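-- pv_equiv track=rewrite | github.com/Valentino1994/dayAlgorithm | onedayAlgorithm/2022/Test/devmatching/t2.py | solution
-- ===== SOURCE A (Python) =====
-- def solution(n, horizontal):
--     answer = [[]]
--
--     now_direction = horizontal
--     now_count = 1
--
--     room = [ [0] * n for _ in range(n) ]
--     room[0][0] = 1
--     now_r, now_c = 0, 0
--
--     # 현재 범위가 무조건 n 안쪽에 있어야함
--     while now_r < n - 1 and now_c < n - 1:
--
--         # 만약 현재 horizontal이면 now_range만큼 아래로 내려왔다가 now_range만큼 왼쪽으로 이동함.
--         if now_direction:
--             # 먼저 한 칸 오른쪽으로 이동시키고 찍어줌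
--             now_c += 1
--             now_count += 1
--             room[now_r][now_c] = now_count
--             while now_c > now_r:
--                 now_r += 1
--                 now_count += 1
--                 room[now_r][now_c] = now_count
--
--             while now_c > 0:
--                 now_c -= 1
--                 now_count += 1
--                 room[now_r][now_c] = now_count
--
--             now_direction = False
--
--         # 만약 현재 vertical이면 now_range만큼 오른쪽으로 갔다가 위쪽으로 이동함.
--         else:
--             now_r += 1
--             now_count += 1
--             room[now_r][now_c] = now_count
--             while now_c < now_r:
--                 now_c += 1
--                 now_count += 1
--                 room[now_r][now_c] = now_count
--
--             while now_r > 0: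
--                 now_r -= 1
--                 now_count += 1
--                 room[now_r][now_c] = now_count
--
--             now_direction = True
--
--     answer = room
--
--     return answer
-- ===== SOURCE B (Python) =====
-- def solution(n, horizontal):
--     # Closed form: row r starts with the shell-r segment, whose values are a
--     # contiguous arithmetic range (ascending or descending by shell direction),
--     # followed by one cell of each later shell c > r computed directly from
--     # (r, c) — no sequential counter or cursor state at all.
--     rows = []
--     for r in range(n):
--         if (r % 2 == 1) == horizontal:
--             head = list(range(r*r + 2*r + 1, r*r + r, -1))
--         else:
--             head = list(range(r*r + 1, r*r + r + 2))
--         tail = [c*c + r + 1 if (c % 2 == 1) == horizontal else c*c + 2*c - r + 1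
--                 for c in range(r + 1, n)]
--         rows.append(head + tail)
--     return rows
-- ===== Notes on version B (the rewrite author's own statement) =====
-- stated objective: alternative
-- what changed: A fills the grid sequentially with a stateful cursor and an incrementing counter walking L-shaped shells; B computes every value in closed form from its coordinates: row r is the shell-r arithmetic range (ascending or descending by parity) concatenated with per-cell formulas for the later shells, with no sequential state.
import Mathlib
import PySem

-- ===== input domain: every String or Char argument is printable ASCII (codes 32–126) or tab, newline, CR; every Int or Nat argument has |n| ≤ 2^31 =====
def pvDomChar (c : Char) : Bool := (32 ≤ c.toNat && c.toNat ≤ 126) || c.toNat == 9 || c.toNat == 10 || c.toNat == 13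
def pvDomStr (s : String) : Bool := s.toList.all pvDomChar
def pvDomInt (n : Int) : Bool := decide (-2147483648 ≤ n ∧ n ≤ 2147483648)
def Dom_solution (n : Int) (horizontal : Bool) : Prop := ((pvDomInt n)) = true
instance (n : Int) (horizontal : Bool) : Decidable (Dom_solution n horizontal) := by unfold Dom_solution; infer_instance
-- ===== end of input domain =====

-- B replaces A's sequential cursor-and-counter shell walk by a closed-form
-- per-cell formula (alternative algorithm; same asymptotic cost).

-- ===== PORT A =====
-- room[r][c] = v (indices are provably in [0,n) wherever the ports use them, so Nat indexing is exact)
def pvSet2 (room : List (List Int)) (r c : Nat) (v : Int) : List (List Int) :=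
  room.set r ((room.getD r []).set c v)

-- while now_c > now_r: now_r += 1; now_count += 1; room[now_r][now_c] = now_count
def pvDown (room : List (List Int)) (r c : Nat) (count : Int) : List (List Int) × Nat × Int :=
  if r < c then pvDown (pvSet2 room (r+1) c (count+1)) (r+1) c (count+1) else (room, r, count)
termination_by c - r
decreasing_by omega

-- while now_c > 0: now_c -= 1; now_count += 1; room[now_r][now_c] = now_count
def pvLeft (room : List (List Int)) (r c : Nat) (count : Int) : List (List Int) × Nat × Int :=
  if 0 < c then pvLeft (pvSet2 room r (c-1) (count+1)) r (c-1) (count+1) else (room, c, count)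
termination_by c

-- while now_c < now_r: now_c += 1; now_count += 1; room[now_r][now_c] = now_count
def pvRight (room : List (List Int)) (r c : Nat) (count : Int) : List (List Int) × Nat × Int :=
  if c < r then pvRight (pvSet2 room r (c+1) (count+1)) r (c+1) (count+1) else (room, c, count)
termination_by r - c
decreasing_by omega

-- while now_r > 0: now_r -= 1; now_count += 1; room[now_r][now_c] = now_count
def pvUp (room : List (List Int)) (r c : Nat) (count : Int) : List (List Int) × Nat × Int :=
  if 0 < r then pvUp (pvSet2 room (r-1) c (count+1)) (r-1) c (count+1) else (room, r, count)
termination_by r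

-- the outer 'while now_r < n - 1 and now_c < n - 1' loop (fuel only makes it total;
-- n.toNat iterations always suffice since each shell strictly grows the corner)
def pvLoop (fuel : Nat) (n : Int) (dir : Bool) (r c : Nat) (count : Int)
    (room : List (List Int)) : List (List Int) :=
  match fuel with
  | 0 => room
  | fuel + 1 =>
    if (r : Int) < n - 1 ∧ (c : Int) < n - 1 then
      if dir then
        let room1 := pvSet2 room r (c+1) (count+1)
        let s2 := pvDown room1 r (c+1) (count+1)
        let s3 := pvLeft s2.1 s2.2.1 (c+1) s2.2.2
        pvLoop fuel n false s2.2.1 s3.2.1 s3.2.2 s3.1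
      else
        let room1 := pvSet2 room (r+1) c (count+1)
        let s2 := pvRight room1 (r+1) c (count+1)
        let s3 := pvUp s2.1 (r+1) s2.2.1 s2.2.2
        pvLoop fuel n true s3.2.1 s2.2.1 s3.2.2 s3.1
    else room

def solution (n : Int) (horizontal : Bool) : List (List Int) :=
  let room0 := (List.range n.toNat).map (fun _ => List.replicate n.toNat (0 : Int))
  pvLoop n.toNat n horizontal 0 0 1 (pvSet2 room0 0 0 1)

-- ===== PORT B =====
-- row r: the shell-r segment as an arithmetic range (direction by parity), then
-- one closed-form cell per later shell c > r
def rowB (horizontal : Bool) (N r : Nat) : List Int :=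
  (if (r % 2 == 1) == horizontal then
     PySem.List.pyRange ((r : Int) * r + 2 * r + 1) ((r : Int) * r + r) (-1)
   else
     PySem.List.pyRange ((r : Int) * r + 1) ((r : Int) * r + r + 2) 1)
  ++ (List.range' (r + 1) (N - (r + 1))).map (fun (c : Nat) =>
       if (c % 2 == 1) == horizontal then (c : Int) * c + r + 1
       else (c : Int) * c + 2 * c - r + 1)

def solution_alt (n : Int) (horizontal : Bool) : List (List Int) :=
  (List.range n.toNat).map (fun r => rowB horizontal n.toNat r)

-- ===== PRECONDITION & SPEC =====
-- Pre excludes exactly n ≤ 0, where A raises IndexError at room[0][0] = 1.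
def Pre_solution (n : Int) (horizontal : Bool) : Prop := 1 ≤ n
instance (n : Int) (horizontal : Bool) : Decidable (Pre_solution n horizontal) := by unfold Pre_solution; infer_instance
def pvWitness_solution : Int × Bool := (4, true)

def Spec_solution (n : Int) (horizontal : Bool) (out : List (List Int)) : Prop := out = solution_alt n horizontal
instance (n : Int) (horizontal : Bool) (out : List (List Int)) : Decidable (Spec_solution n horizontal out) := by unfold Spec_solution; infer_instance

-- ===== CLAIM (what is proved, stated in full; the proofs are below) =====
def Claim_equal_solution : Prop := ∀ (n : Int) (horizontal : Bool), Dom_solution n horizontal → Pre_solution n horizontal → Spec_solution n horizontal (solution n horizontal)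

-- ===== LEMMAS AND PROOFS =====

-- closed-form value of cell (r, c): proof-side characterisation shared by both sides
def cellValue (horizontal : Bool) (r c : Nat) : Int :=
  let k := max r c
  if k = 0 then 1
  else
    let pos : Nat :=
      if (k % 2 == 1) == horizontal then (if c = k then r else 2 * k - c)
      else (if r = k then c else 2 * k - r)
    (k : Int) * k + (pos : Int) + 1


-- the coordinate sequence A's shell-k walk visits, in order
def shellCoords (k : Nat) (dir : Bool) : List (Nat × Nat) :=
  if dir then
    (List.range (k+1)).map (fun r => (r, k)) ++ (List.range k).reverse.map (fun c => (k, c))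
  else
    (List.range (k+1)).map (fun c => (k, c)) ++ (List.range k).reverse.map (fun r => (r, k))

-- assign count+1, count+2, … along a coordinate list
def applyCoords (st : List (List Int) × Int) (coords : List (Nat × Nat)) : List (List Int) × Int :=
  coords.foldl (fun st rc => (pvSet2 st.1 rc.1 rc.2 (st.2 + 1), st.2 + 1)) st

lemma applyCoords_cons (st : List (List Int) × Int) (rc : Nat × Nat) (l : List (Nat × Nat)) :
    applyCoords st (rc :: l) = applyCoords (pvSet2 st.1 rc.1 rc.2 (st.2 + 1), st.2 + 1) l := rfl

lemma applyCoords_append (st : List (List Int) × Int) (l1 l2 : List (Nat × Nat)) :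
    applyCoords st (l1 ++ l2) = applyCoords (applyCoords st l1) l2 := by
  simp [applyCoords]

lemma pvDown_eq (d : Nat) : ∀ (room : List (List Int)) (r : Nat) (count : Int),
    pvDown room r (r + d) count =
      ((applyCoords (room, count) ((List.range' (r+1) d).map (fun i => (i, r + d)))).1,
       r + d,
       (applyCoords (room, count) ((List.range' (r+1) d).map (fun i => (i, r + d)))).2) := by
  induction d with
  | zero => intro room r count; simp [pvDown, applyCoords]
  | succ d ih =>
    intro room r count
    have h1 : r < r + (d + 1) := by omega
    have h2 : r + (d + 1) = (r + 1) + d := by omega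
    rw [pvDown, if_pos h1]
    simp only [h2, ih, List.range'_succ, List.map_cons, applyCoords_cons]

lemma pvLeft_eq (c : Nat) : ∀ (room : List (List Int)) (r : Nat) (count : Int),
    pvLeft room r c count =
      ((applyCoords (room, count) ((List.range c).reverse.map (fun j => (r, j)))).1,
       0,
       (applyCoords (room, count) ((List.range c).reverse.map (fun j => (r, j)))).2) := by
  induction c with
  | zero => intro room r count; simp [pvLeft, applyCoords]
  | succ c ih =>
    intro room r count
    rw [pvLeft]
    simp only [if_pos (Nat.succ_pos c), Nat.add_sub_cancel, ih,
      List.range_succ, List.reverse_append, List.reverse_singleton, List.singleton_append,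
      List.map_cons, applyCoords_cons]

lemma pvRight_eq (d : Nat) : ∀ (room : List (List Int)) (c : Nat) (count : Int),
    pvRight room (c + d) c count =
      ((applyCoords (room, count) ((List.range' (c+1) d).map (fun j => (c + d, j)))).1,
       c + d,
       (applyCoords (room, count) ((List.range' (c+1) d).map (fun j => (c + d, j)))).2) := by
  induction d with
  | zero => intro room c count; simp [pvRight, applyCoords]
  | succ d ih =>
    intro room c count
    have h1 : c < c + (d + 1) := by omega
    have h2 : c + (d + 1) = (c + 1) + d := by omega
    rw [pvRight, if_pos h1]
    simp only [h2, ih, List.range'_succ, List.map_cons, applyCoords_cons]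

lemma pvUp_eq (r : Nat) : ∀ (room : List (List Int)) (c : Nat) (count : Int),
    pvUp room r c count =
      ((applyCoords (room, count) ((List.range r).reverse.map (fun i => (i, c)))).1,
       0,
       (applyCoords (room, count) ((List.range r).reverse.map (fun i => (i, c)))).2) := by
  induction r with
  | zero => intro room c count; simp [pvUp, applyCoords]
  | succ r ih =>
    intro room c count
    rw [pvUp]
    simp only [if_pos (Nat.succ_pos r), Nat.add_sub_cancel, ih,
      List.range_succ, List.reverse_append, List.reverse_singleton, List.singleton_append,
      List.map_cons, applyCoords_cons]

lemma dir_flip (k : Nat) (h : Bool) :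
    (((k + 1) % 2 == 1) == h) = !((k % 2 == 1) == h) := by
  rcases Nat.mod_two_eq_zero_or_one k with hk | hk <;>
    have hk1 : (k + 1) % 2 = 1 - k % 2 := by omega
  all_goals cases h <;> simp [hk, hk1]

lemma range_succ_cons (k : Nat) : List.range (k + 1) = 0 :: List.range' 1 k := by
  rw [List.range_eq_range', List.range'_succ]

lemma loop_eq (n : Int) (h : Bool) : ∀ (fuel k : Nat) (room : List (List Int)) (count : Int),
    1 ≤ k → n.toNat ≤ k + fuel →
    pvLoop fuel n ((k % 2 == 1) == h)
      (if (k % 2 == 1) == h then 0 else k - 1)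
      (if (k % 2 == 1) == h then k - 1 else 0) count room
    = ((List.range' k (n.toNat - k)).foldl
        (fun st j => applyCoords st (shellCoords j ((j % 2 == 1) == h))) (room, count)).1 := by
  intro fuel
  induction fuel with
  | zero =>
    intro k room count hk hf
    have : n.toNat - k = 0 := by omega
    simp [pvLoop, this]
  | succ fuel ih =>
    intro k room count hk hf
    by_cases hkn : (k : Int) < n
    · have hcond : ((0 : Nat) : Int) < n - 1 ∧ ((k - 1 : Nat) : Int) < n - 1 := by
        constructor <;> omega
      have hlen : n.toNat - k = (n.toNat - (k + 1)) + 1 := by omega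
      have hsplit : List.range' k (n.toNat - k)
          = k :: List.range' (k + 1) (n.toNat - (k + 1)) := by
        rw [hlen, List.range'_succ]
      rw [hsplit, List.foldl_cons]
      have hc1 : (k - 1) + 1 = k := by omega
      cases hd : ((k % 2 == 1) == h) with
      | true =>
        -- horizontal shell from (0, k-1)
        rw [pvLoop]
        simp only [if_true, hc1, if_pos hcond]
        have hdown := pvDown_eq k (pvSet2 room 0 k (count + 1)) 0 (count + 1)
        simp only [Nat.zero_add] at hdown
        rw [hdown]
        simp only [pvLeft_eq]
        have hdir1 : (((k + 1) % 2 == 1) == h) = false := by rw [dir_flip, hd]; rfl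
        have hih := fun (room' : List (List Int)) (count' : Int) =>
          ih (k + 1) room' count' (by omega) (by omega)
        simp only [hdir1, Bool.false_eq_true, if_false, Nat.add_sub_cancel] at hih
        rw [hih]
        congr 2
        show applyCoords _ _ = applyCoords (room, count) (shellCoords k true)
        rw [shellCoords, if_pos rfl, applyCoords_append, range_succ_cons,
          List.map_cons, applyCoords_cons]
      | false =>
        -- vertical shell from (k-1, 0)
        rw [pvLoop]
        simp only [Bool.false_eq_true, if_false, hc1,
          if_pos (And.intro hcond.2 hcond.1)]
        have hright := pvRight_eq k (pvSet2 room k 0 (count + 1)) 0 (count + 1)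
        simp only [Nat.zero_add] at hright
        rw [hright]
        simp only [pvUp_eq]
        have hdir1 : (((k + 1) % 2 == 1) == h) = true := by rw [dir_flip, hd]; rfl
        have hih := fun (room' : List (List Int)) (count' : Int) =>
          ih (k + 1) room' count' (by omega) (by omega)
        simp only [hdir1, if_true, Nat.add_sub_cancel] at hih
        rw [hih]
        congr 2
        show applyCoords _ _ = applyCoords (room, count) (shellCoords k false)
        rw [shellCoords, if_neg (by simp), applyCoords_append, range_succ_cons,
          List.map_cons, applyCoords_cons]
    · -- loop condition is false and no shells remain
      have hfin : n.toNat - k = 0 := by omega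
      rw [pvLoop]
      cases hd : ((k % 2 == 1) == h) with
      | true =>
        simp only [if_true]
        rw [if_neg (by intro hcontra; rcases hcontra with ⟨_, h2⟩; omega)]
        simp [hfin]
      | false =>
        simp only [Bool.false_eq_true, if_false]
        rw [if_neg (by intro hcontra; rcases hcontra with ⟨h1, _⟩; omega)]
        simp [hfin]

-- ===== B-side characterisation: the sequential shell fill computes the closed form =====

def pvGet2 (g : List (List Int)) (r c : Nat) : Int := (g.getD r []).getD c 0

def Shape (g : List (List Int)) (N : Nat) : Prop :=
  g.length = N ∧ ∀ row ∈ g, row.length = N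

lemma shape_set {g : List (List Int)} {N r c : Nat} {v : Int}
    (hs : Shape g N) (hr : r < N) : Shape (pvSet2 g r c v) N := by
  obtain ⟨hl, hrow⟩ := hs
  refine ⟨by simp [pvSet2, hl], ?_⟩
  intro row hmem
  rcases List.mem_or_eq_of_mem_set hmem with hmem' | heq
  · exact hrow _ hmem'
  · subst heq
    rw [List.length_set, List.getD_eq_getElem _ _ (by omega)]
    exact hrow _ (List.getElem_mem _)

lemma get2_set {g : List (List Int)} {N r c : Nat} {v : Int}
    (hs : Shape g N) (hr : r < N) (hc : c < N) (r' c' : Nat) :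
    pvGet2 (pvSet2 g r c v) r' c' = if r' = r ∧ c' = c then v else pvGet2 g r' c' := by
  obtain ⟨hl, hrow⟩ := hs
  have hrg : r < g.length := by omega
  unfold pvGet2 pvSet2
  simp only [List.getD_eq_getElem?_getD]
  by_cases hre : r' = r
  · subst hre
    have hcl : c < (g[r']'hrg).length := by
      have := hrow _ (List.getElem_mem hrg); omega
    by_cases hce : c' = c
    · subst hce
      simp [List.getElem?_set, hrg, hcl]
    · simp [List.getElem?_set, hrg, hce, Ne.symm hce]
  · simp [List.getElem?_set, hre, Ne.symm hre]

lemma applyCoords_spec {N : Nat} (v : Nat × Nat → Int) :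
    ∀ (coords : List (Nat × Nat)) (st : List (List Int) × Int),
    Shape st.1 N → coords.Nodup → (∀ p ∈ coords, p.1 < N ∧ p.2 < N) →
    (∀ (i : Nat) (p : Nat × Nat), coords[i]? = some p → v p = st.2 + i + 1) →
    Shape (applyCoords st coords).1 N ∧
    (applyCoords st coords).2 = st.2 + coords.length ∧
    ∀ r c, pvGet2 (applyCoords st coords).1 r c =
      if (r, c) ∈ coords then v (r, c) else pvGet2 st.1 r c := by
  intro coords
  induction coords with
  | nil => intro st hs _ _ _; exact ⟨hs, by simp [applyCoords], by simp [applyCoords]⟩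
  | cons p rest ih =>
    intro st hs hnd hbd hv
    rw [applyCoords_cons]
    have hp : p.1 < N ∧ p.2 < N := hbd p (List.mem_cons_self ..)
    have hv' : ∀ (i : Nat) (q : Nat × Nat), rest[i]? = some q →
        v q = (pvSet2 st.1 p.1 p.2 (st.2 + 1), st.2 + 1).2 + i + 1 := by
      intro i q hq
      have := hv (i + 1) q (by simpa using hq)
      push_cast at this ⊢
      linarith
    obtain ⟨hS, hC, hG⟩ := ih (pvSet2 st.1 p.1 p.2 (st.2 + 1), st.2 + 1)
      (shape_set hs hp.1) (List.Nodup.of_cons hnd)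
      (fun q hq => hbd q (List.mem_cons_of_mem _ hq)) hv'
    refine ⟨hS, by simp at hC ⊢; rw [hC]; push_cast; ring, ?_⟩
    intro r c
    rw [hG r c]
    have hset := get2_set (v := st.2 + 1) hs hp.1 hp.2 r c
    simp only at hset
    rw [hset]
    have hv0 : v p = st.2 + 1 := by simpa using hv 0 p (by simp)
    by_cases hmem : (r, c) ∈ rest
    · simp [hmem, List.mem_cons_of_mem _ hmem]
    · by_cases heq : (r, c) = p
      · subst heq
        simp [hmem, hv0]
      · have hne : ¬(r = p.1 ∧ c = p.2) := by
          intro hcon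
          exact heq (by rw [Prod.ext_iff]; exact hcon)
        simp [hmem, heq, hne]

lemma length_shellCoords (k : Nat) (d : Bool) : (shellCoords k d).length = 2 * k + 1 := by
  cases d <;> simp [shellCoords] <;> omega

lemma mem_shellCoords (k : Nat) (d : Bool) (r c : Nat) :
    (r, c) ∈ shellCoords k d ↔ max r c = k := by
  cases d <;>
    simp only [shellCoords, if_true, Bool.false_eq_true, if_false, List.mem_append,
      List.mem_map, List.mem_range, List.mem_reverse, Prod.mk.injEq] <;>
    constructor
  · rintro (⟨a, ha, h1, h2⟩ | ⟨a, ha, h1, h2⟩) <;> omega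
  · intro h
    by_cases hr : r = k
    · exact Or.inl ⟨c, by omega, by omega, by omega⟩
    · exact Or.inr ⟨r, by omega, by omega, by omega⟩
  · rintro (⟨a, ha, h1, h2⟩ | ⟨a, ha, h1, h2⟩) <;> omega
  · intro h
    by_cases hc : c = k
    · exact Or.inl ⟨r, by omega, by omega, by omega⟩
    · exact Or.inr ⟨c, by omega, by omega, by omega⟩

lemma nodup_shellCoords (k : Nat) (d : Bool) : (shellCoords k d).Nodup := by
  cases d <;>
    simp only [shellCoords, if_true, Bool.false_eq_true, if_false] <;>
    refine List.Nodup.append (List.Nodup.map ?_ List.nodup_range)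
      (List.Nodup.map ?_ (List.nodup_reverse.mpr List.nodup_range)) ?_
  · exact fun a b h => (Prod.mk.inj h).2
  · exact fun a b h => (Prod.mk.inj h).1
  · intro p hp hq
    simp only [List.mem_map, List.mem_range, List.mem_reverse] at hp hq
    obtain ⟨a, ha, rfl⟩ := hp
    obtain ⟨b, hb, hab⟩ := hq
    simp only [Prod.mk.injEq] at hab
    omega
  · exact fun a b h => (Prod.mk.inj h).1
  · exact fun a b h => (Prod.mk.inj h).2
  · intro p hp hq
    simp only [List.mem_map, List.mem_range, List.mem_reverse] at hp hq
    obtain ⟨a, ha, rfl⟩ := hp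
    obtain ⟨b, hb, hab⟩ := hq
    simp only [Prod.mk.injEq] at hab
    omega

lemma shellCoords_index (k : Nat) (hk : 1 ≤ k) (h : Bool) :
    ∀ (i : Nat) (p : Nat × Nat), (shellCoords k ((k % 2 == 1) == h))[i]? = some p →
      cellValue h p.1 p.2 = (k : Int) * k + i + 1 := by
  intro i p hp
  cases hd : ((k % 2 == 1) == h) with
  | true =>
    rw [hd] at hp
    simp only [shellCoords, if_true, List.getElem?_append] at hp
    by_cases hi : i < k + 1
    · rw [if_pos (by simpa using hi)] at hp
      rw [List.getElem?_map, List.getElem?_range hi] at hp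
      simp only [Option.map_some] at hp
      obtain rfl := Option.some.inj hp
      simp only [cellValue]
      have hm : max i k = k := by omega
      rw [hm, if_neg (by omega), if_pos hd, if_pos rfl]
    · obtain ⟨j, rfl⟩ : ∃ j, i = (k + 1) + j := ⟨i - (k + 1), by omega⟩
      rw [if_neg (by simpa using hi)] at hp
      simp only [List.length_map, List.length_range, Nat.add_sub_cancel_left] at hp
      have hjk : j < k := by
        by_contra hc
        rw [List.getElem?_eq_none (by simp; omega)] at hp
        simp at hp
      rw [List.getElem?_map, List.getElem?_reverse (by simpa using hjk)] at hp
      simp only [List.length_range, List.getElem?_range (show k - 1 - j < k by omega),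
        Option.map_some] at hp
      obtain rfl := Option.some.inj hp
      simp only [cellValue]
      have hm : max k (k - 1 - j) = k := by omega
      rw [hm, if_neg (by omega), if_pos hd, if_neg (by omega)]
      have h2 : 2 * k - (k - 1 - j) = k + 1 + j := by omega
      rw [h2]
  | false =>
    rw [hd] at hp
    simp only [shellCoords, Bool.false_eq_true, if_false, List.getElem?_append] at hp
    by_cases hi : i < k + 1
    · rw [if_pos (by simpa using hi)] at hp
      rw [List.getElem?_map, List.getElem?_range hi] at hp
      simp only [Option.map_some] at hp
      obtain rfl := Option.some.inj hp
      simp only [cellValue]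
      have hm : max k i = k := by omega
      rw [hm, if_neg (by omega), if_neg (by simp [hd]), if_pos rfl]
    · obtain ⟨j, rfl⟩ : ∃ j, i = (k + 1) + j := ⟨i - (k + 1), by omega⟩
      rw [if_neg (by simpa using hi)] at hp
      simp only [List.length_map, List.length_range, Nat.add_sub_cancel_left] at hp
      have hjk : j < k := by
        by_contra hc
        rw [List.getElem?_eq_none (by simp; omega)] at hp
        simp at hp
      rw [List.getElem?_map, List.getElem?_reverse (by simpa using hjk)] at hp
      simp only [List.length_range, List.getElem?_range (show k - 1 - j < k by omega),
        Option.map_some] at hp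
      obtain rfl := Option.some.inj hp
      simp only [cellValue]
      have hm : max (k - 1 - j) k = k := by omega
      rw [hm, if_neg (by omega), if_neg (by simp [hd]), if_neg (by omega)]
      have h2 : 2 * k - (k - 1 - j) = k + 1 + j := by omega
      rw [h2]

lemma get2_room0 (N r c : Nat) :
    pvGet2 ((List.range N).map (fun _ => List.replicate N (0 : Int))) r c = 0 := by
  unfold pvGet2
  simp only [List.getD_eq_getElem?_getD, List.getElem?_map]
  by_cases hr : r < N
  · simp only [List.getElem?_range hr, Option.map_some, Option.getD_some]
    by_cases hc : c < N
    · simp [List.getElem?_replicate, hc]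
    · rw [List.getElem?_eq_none (l := List.replicate N (0 : Int)) (by simpa using Nat.le_of_not_lt hc)]
      simp
  · rw [List.getElem?_eq_none (l := List.range N) (by simpa using Nat.le_of_not_lt hr)]
    simp

lemma shape_room0 (N : Nat) :
    Shape ((List.range N).map (fun _ => List.replicate N (0 : Int))) N := by
  refine ⟨by simp, ?_⟩
  intro row hmem
  simp only [List.mem_map] at hmem
  obtain ⟨_, _, rfl⟩ := hmem
  simp

lemma cellValue_zero (h : Bool) : cellValue h 0 0 = 1 := by simp [cellValue]

-- the invariant: after shells 1..m the grid holds the closed form on max r c ≤ m and 0 elsewhere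
lemma fold_inv (h : Bool) (N : Nat) (hN : 1 ≤ N) : ∀ (m : Nat), m < N →
    Shape ((List.range' 1 m).foldl
      (fun st j => applyCoords st (shellCoords j ((j % 2 == 1) == h)))
      (pvSet2 ((List.range N).map (fun _ => List.replicate N (0 : Int))) 0 0 1, 1)).1 N ∧
    ((List.range' 1 m).foldl
      (fun st j => applyCoords st (shellCoords j ((j % 2 == 1) == h)))
      (pvSet2 ((List.range N).map (fun _ => List.replicate N (0 : Int))) 0 0 1, 1)).2
      = ((m : Int) + 1) * ((m : Int) + 1) ∧
    ∀ r c, pvGet2 ((List.range' 1 m).foldl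
      (fun st j => applyCoords st (shellCoords j ((j % 2 == 1) == h)))
      (pvSet2 ((List.range N).map (fun _ => List.replicate N (0 : Int))) 0 0 1, 1)).1 r c
      = if max r c ≤ m then cellValue h r c else 0 := by
  intro m
  induction m with
  | zero =>
    intro _
    refine ⟨shape_set (shape_room0 N) hN, by simp, ?_⟩
    intro r c
    rw [show (List.range' 1 0) = [] from rfl, List.foldl_nil]
    have hset := get2_set (v := 1) (shape_room0 N) hN hN r c
    simp only at hset
    rw [hset, get2_room0]
    by_cases hrc : max r c ≤ 0
    · have hr0 : r = 0 ∧ c = 0 := by omega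
      simp [hrc, hr0.1, hr0.2, cellValue_zero]
    · have hne : ¬(r = 0 ∧ c = 0) := by omega
      simp [hrc, hne]
  | succ m ih =>
    intro hm
    obtain ⟨hS, hC, hG⟩ := ih (by omega)
    rw [show List.range' 1 (m + 1) = List.range' 1 m ++ [m + 1] by
        have he : 1 + 1 * m = m + 1 := by omega
        rw [List.range'_concat, he], List.foldl_append, List.foldl_cons, List.foldl_nil]
    set st := (List.range' 1 m).foldl
      (fun st j => applyCoords st (shellCoords j ((j % 2 == 1) == h)))
      (pvSet2 ((List.range N).map (fun _ => List.replicate N (0 : Int))) 0 0 1, 1) with hst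
    have hv : ∀ (i : Nat) (p : Nat × Nat),
        (shellCoords (m + 1) (((m + 1) % 2 == 1) == h))[i]? = some p →
        (fun p : Nat × Nat => cellValue h p.1 p.2) p = st.2 + i + 1 := by
      intro i p hp
      show cellValue h p.1 p.2 = st.2 + i + 1
      rw [shellCoords_index (m + 1) (by omega) h i p hp, hC]
      push_cast
      ring
    have hbd : ∀ p ∈ shellCoords (m + 1) (((m + 1) % 2 == 1) == h), p.1 < N ∧ p.2 < N := by
      intro p hp
      have := (mem_shellCoords (m + 1) _ p.1 p.2).mp (by simpa using hp)
      omega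
    obtain ⟨hS', hC', hG'⟩ := applyCoords_spec (N := N)
      (fun p : Nat × Nat => cellValue h p.1 p.2)
      (shellCoords (m + 1) (((m + 1) % 2 == 1) == h)) st hS
      (nodup_shellCoords _ _) hbd hv
    refine ⟨hS', ?_, ?_⟩
    · rw [hC', hC, length_shellCoords]
      push_cast
      ring
    · intro r c
      rw [hG' r c, hG r c]
      by_cases hmem : (r, c) ∈ shellCoords (m + 1) (((m + 1) % 2 == 1) == h)
      · have hmax := (mem_shellCoords _ _ r c).mp hmem
        simp [hmem, show max r c ≤ m + 1 by omega]
      · have hmax : ¬ max r c = m + 1 := fun he => hmem ((mem_shellCoords _ _ r c).mpr he)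
        by_cases hle : max r c ≤ m
        · simp [hmem, hle, show max r c ≤ m + 1 by omega]
        · simp [hmem, hle, show ¬ max r c ≤ m + 1 by omega]

lemma eq_of_shape_get2 {g1 g2 : List (List Int)} {N : Nat}
    (h1 : Shape g1 N) (h2 : Shape g2 N)
    (he : ∀ r c, pvGet2 g1 r c = pvGet2 g2 r c) : g1 = g2 := by
  obtain ⟨hl1, hr1⟩ := h1
  obtain ⟨hl2, hr2⟩ := h2
  apply List.ext_getElem (by omega)
  intro r hra hrb
  have hrow1 : g1[r].length = N := hr1 _ (List.getElem_mem _)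
  have hrow2 : g2[r].length = N := hr2 _ (List.getElem_mem _)
  apply List.ext_getElem (by omega)
  intro c hca hcb
  have := he r c
  unfold pvGet2 at this
  rwa [List.getD_eq_getElem _ _ hra, List.getD_eq_getElem _ _ hrb,
    List.getD_eq_getElem _ _ hca, List.getD_eq_getElem _ _ hcb] at this

lemma rowB_eq (h : Bool) (N r : Nat) (hr : r < N) :
    rowB h N r = (List.range N).map (fun c => cellValue h r c) := by
  have hsplit : List.range N = List.range' 0 (r + 1) ++ List.range' (r + 1) (N - (r + 1)) := by
    have hN : N = (r + 1) + (N - (r + 1)) := by omega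
    rw [List.range_eq_range']
    conv_lhs => rw [hN]
    rw [← List.range'_append]
    norm_num
  rw [hsplit, List.map_append, rowB]
  congr 1
  · -- head: the shell-r arithmetic range
    rw [show List.range' 0 (r + 1) = List.range (r + 1) from List.range_eq_range'.symm]
    cases hd : ((r % 2 == 1) == h) with
    | true =>
      rw [if_pos rfl, PySem.List.pyRange_neg_one]
      rw [show (((r : Int) * r + 2 * r + 1) - ((r : Int) * r + r)).toNat = r + 1 by omega]
      refine List.map_congr_left ?_
      intro q hq
      have hqr : q ≤ r := by simpa [Nat.lt_succ_iff] using hq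
      by_cases hr0 : r = 0
      · subst hr0
        have hq0 : q = 0 := by omega
        subst hq0
        simp [cellValue]
      · simp only [cellValue]
        rw [show max r q = r from by omega, if_neg hr0, if_pos hd]
        by_cases hqe : q = r
        · subst hqe
          rw [if_pos rfl]
          push_cast
          ring
        · rw [if_neg hqe]
          push_cast [Nat.cast_sub (show q ≤ 2 * r by omega)]
          ring
    | false =>
      rw [if_neg (by simp), PySem.List.pyRange_one]
      rw [show (((r : Int) * r + r + 2) - ((r : Int) * r + 1)).toNat = r + 1 by omega]
      refine List.map_congr_left ?_
      intro q hq
      have hqr : q ≤ r := by simpa [Nat.lt_succ_iff] using hq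
      by_cases hr0 : r = 0
      · subst hr0
        have hq0 : q = 0 := by omega
        subst hq0
        simp [cellValue]
      · simp only [cellValue]
        rw [show max r q = r from by omega, if_neg hr0, if_neg (by simp [hd]), if_pos rfl]
        push_cast
        ring
  · -- tail: one cell of each later shell
    refine List.map_congr_left ?_
    intro c hc
    have hrc : r + 1 ≤ c := (List.mem_range'_1.mp hc).1
    simp only [cellValue]
    rw [show max r c = c from by omega, if_neg (show ¬ c = 0 by omega)]
    cases hd : ((c % 2 == 1) == h) with
    | true => simp
    | false =>
      rw [if_neg (by simp), if_neg (by simp), if_neg (show ¬ r = c by omega)]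
      push_cast [Nat.cast_sub (show r ≤ 2 * c by omega)]
      ring

lemma shape_alt (n : Int) (h : Bool) : Shape (solution_alt n h) n.toNat := by
  refine ⟨by simp [solution_alt], ?_⟩
  intro row hmem
  simp only [solution_alt, List.mem_map, List.mem_range] at hmem
  obtain ⟨r, hr, rfl⟩ := hmem
  rw [rowB_eq h n.toNat r hr]
  simp

lemma get2_alt (n : Int) (h : Bool) (r c : Nat) :
    pvGet2 (solution_alt n h) r c =
      if r < n.toNat ∧ c < n.toNat then cellValue h r c else 0 := by
  unfold pvGet2 solution_alt
  simp only [List.getD_eq_getElem?_getD, List.getElem?_map]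
  by_cases hr : r < n.toNat
  · simp only [List.getElem?_range hr, Option.map_some, Option.getD_some]
    rw [rowB_eq h n.toNat r hr]
    by_cases hc : c < n.toNat
    · simp [List.getElem?_map, List.getElem?_range hc, hr, hc]
    · rw [List.getElem?_eq_none
        (l := List.map (fun c => cellValue h r c) (List.range n.toNat))
        (by simpa using Nat.le_of_not_lt hc)]
      simp [hc]
  · rw [List.getElem?_eq_none (l := List.range n.toNat) (by simpa using Nat.le_of_not_lt hr)]
    simp [hr]

-- ===== VERDICT (by name: the statement is the Claim_ definition above) =====
theorem solution_spec : Claim_equal_solution := by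
  intro n h _ hpre
  unfold Spec_solution
  have hN : 1 ≤ n.toNat := by unfold Pre_solution at hpre; omega
  have h1 : ((1 % 2 == 1) == h) = h := by cases h <;> rfl
  have hloop := loop_eq n h n.toNat 1
    (pvSet2 ((List.range n.toNat).map (fun _ => List.replicate n.toNat (0 : Int))) 0 0 1) 1
    le_rfl (by omega)
  simp only [h1, show (1 : Nat) - 1 = 0 from rfl, ite_self] at hloop
  have hsol : solution n h = pvLoop n.toNat n h 0 0 1
      (pvSet2 ((List.range n.toNat).map (fun _ => List.replicate n.toNat (0 : Int))) 0 0 1) := rfl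
  rw [hsol, hloop]
  obtain ⟨hS, _, hG⟩ := fold_inv h n.toNat hN (n.toNat - 1) (by omega)
  refine eq_of_shape_get2 hS (shape_alt n h) ?_
  intro r c
  rw [hG r c, get2_alt]
  by_cases hrc : r < n.toNat ∧ c < n.toNat
  · rw [if_pos (show max r c ≤ n.toNat - 1 by omega), if_pos hrc]
  · rw [if_neg (show ¬ (max r c ≤ n.toNat - 1) by omega), if_neg hrc]
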